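-- pv_equiv track=rewrite | github.com/peterdresslar/hybrid-signal-lab | signal_lab/sweep_plot_compare.py | family_order
-- ===== SOURCE A (Python) =====
-- from collections import Counter, defaultdict
-- from typing import Any
--
-- FAMILY_ORDER = [
--     "baseline",
--     "constant",
--     "early_boost",
--     "middle_bump",
--     "late_boost",
--     "early_suppress",
--     "late_suppress",
--     "early_high_late_low",
--     "late_high_early_low",
--     "edges_high",
--     "edges_low",
--     "ramp_up",
--     "ramp_down",
--     "other",
-- ]
--
-- def family_sort_key(family: str) -> tuple[int, str]:
--     if family in FAMILY_ORDER:
--         return (FAMILY_ORDER.index(family), family)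
--     return (len(FAMILY_ORDER), family)
--
-- def family_order(rows: list[dict[str, Any]], min_points: int) -> list[str]:
--     counts = Counter(str(row["g_family"]) for row in rows if str(row["g_family"]) != "baseline")
--     families = [
--         family
--         for family, count in counts.items()
--         if count >= min_points
--     ]
--     return sorted(families, key=family_sort_key)
-- ===== SOURCE B (Python) =====
-- FAMILY_ORDER = [
--     "baseline",
--     "constant",
--     "early_boost",
--     "middle_bump",
--     "late_boost",
--     "early_suppress",
--     "late_suppress",
--     "early_high_late_low",
--     "late_high_early_low",
--     "edges_high",
--     "edges_low",
--     "ramp_up",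
--     "ramp_down",
--     "other",
-- ]
--
-- def family_order(rows, min_points):
--     counts = {}
--     for row in rows:
--         fam = str(row["g_family"])
--         if fam != "baseline":
--             counts[fam] = counts.get(fam, 0) + 1
--     known = [f for f in FAMILY_ORDER if f in counts and counts[f] >= min_points]
--     extras = sorted(f for f in counts if f not in FAMILY_ORDER and counts[f] >= min_points)
--     return known + extras
-- ===== Notes on version B (the rewrite author's own statement) =====
-- stated objective: simpler
-- what changed: B builds the counts with a plain dict loop and emits the result directly: a walk of FAMILY_ORDER keeps the predefined order, then the unknown qualifying families are sorted alphabetically and appended, replacing A's key-function sort of all qualifying families (Pre_ excludes rows missing the 'g_family' key, where both programs raise KeyError).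
import Mathlib
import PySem

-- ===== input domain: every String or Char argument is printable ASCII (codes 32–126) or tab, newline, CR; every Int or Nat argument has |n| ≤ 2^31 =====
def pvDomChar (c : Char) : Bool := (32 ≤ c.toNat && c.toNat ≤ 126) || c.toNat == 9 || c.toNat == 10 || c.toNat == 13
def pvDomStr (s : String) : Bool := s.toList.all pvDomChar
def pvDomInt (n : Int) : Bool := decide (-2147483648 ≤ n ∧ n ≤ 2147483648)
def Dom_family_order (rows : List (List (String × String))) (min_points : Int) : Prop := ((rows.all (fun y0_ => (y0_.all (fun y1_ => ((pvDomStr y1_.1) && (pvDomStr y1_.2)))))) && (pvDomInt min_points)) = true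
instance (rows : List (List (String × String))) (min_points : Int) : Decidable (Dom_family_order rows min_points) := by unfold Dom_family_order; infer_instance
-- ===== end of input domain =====

-- B replaces A's key-function sort by a direct walk of FAMILY_ORDER plus an alphabetically
-- sorted tail of unknown families; Pre_ excludes rows without the "g_family" key (KeyError in both).

-- ===== PORT A =====
def FAMILY_ORDER_L : List String :=
  ["baseline", "constant", "early_boost", "middle_bump", "late_boost",
   "early_suppress", "late_suppress", "early_high_late_low", "late_high_early_low",
   "edges_high", "edges_low", "ramp_up", "ramp_down", "other"]

-- row["g_family"]; the "" default is unreachable under Pre_family_order (the key is present)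
def pvGetFam (row : List (String × String)) : String :=
  ((PySem.Dict.mk row).get? "g_family").getD ""

-- family_sort_key; the `.getD 0` is guarded by the membership test, so the default is unreachable
def pv_family_sort_key (f : String) : Int × String :=
  if f ∈ FAMILY_ORDER_L then (((PySem.List.index? FAMILY_ORDER_L f).getD 0 : Nat), f)
  else ((FAMILY_ORDER_L.length : Int), f)

def family_order (rows : List (List (String × String))) (min_points : Int) : List String :=
  let counts := PySem.Dict.counter ((rows.map pvGetFam).filter (fun f => f ≠ "baseline"))
  let families := (counts.items.filter (fun p => p.2 ≥ min_points)).map (fun p => p.1)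
  PySem.List.sorted2 families (fun f => (pv_family_sort_key f).1) (fun f => (pv_family_sort_key f).2)

-- ===== PORT B =====
def family_order_alt (rows : List (List (String × String))) (min_points : Int) : List String :=
  let counts := rows.foldl
    (fun d row =>
      let fam := pvGetFam row
      if fam ≠ "baseline" then d.insert fam (d.getD fam 0 + 1) else d)
    PySem.Dict.empty
  let known := FAMILY_ORDER_L.filter (fun f => counts.contains f && decide (counts.getD f 0 ≥ min_points))
  let extras := PySem.List.sorted
    (counts.keys.filter (fun f => !decide (f ∈ FAMILY_ORDER_L) && decide (counts.getD f 0 ≥ min_points)))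
    (fun x => x)
  known ++ extras

-- ===== PRECONDITION & SPEC =====
-- Pre_ excludes exactly the inputs where A raises KeyError: a row without the "g_family" key.
def Pre_family_order (rows : List (List (String × String))) (min_points : Int) : Prop :=
  rows.all (fun row => (PySem.Dict.mk row).contains "g_family") = true
instance (rows : List (List (String × String))) (min_points : Int) : Decidable (Pre_family_order rows min_points) := by unfold Pre_family_order; infer_instance

def pvWitness_family_order : (List (List (String × String))) × Int :=
  ([[("g_family", "ramp_up")], [("g_family", "zeta")], [("g_family", "ramp_up")]], 1)

def Spec_family_order (rows : List (List (String × String))) (min_points : Int) (out : List String) : Prop := out = family_order_alt rows min_points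
instance (rows : List (List (String × String))) (min_points : Int) (out : List String) : Decidable (Spec_family_order rows min_points out) := by unfold Spec_family_order; infer_instance

-- ===== CLAIM (what is proved, stated in full; the proofs are below) =====
def Claim_equal_family_order : Prop := ∀ (rows : List (List (String × String))) (min_points : Int), Dom_family_order rows min_points → Pre_family_order rows min_points → Spec_family_order rows min_points (family_order rows min_points)

-- ===== LEMMAS AND PROOFS =====

def pvKey (f : String) : Lex (Int × String) := toLex (pv_family_sort_key f)

-- the qualifying test both programs apply to a non-baseline family
def pvQ (fams : List String) (mp : Int) : String → Bool :=
  fun f => decide ((fams.count f : Int) ≥ mp)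

lemma pv_foldl_counter (l : List (List (String × String))) (d : PySem.Dict String Int) :
    l.foldl (fun d row =>
        let fam := pvGetFam row
        if fam ≠ "baseline" then d.insert fam (d.getD fam 0 + 1) else d) d
    = ((l.map pvGetFam).filter (fun f => f ≠ "baseline")).foldl
        (fun d x => d.insert x (d.getD x 0 + 1)) d := by
  induction l generalizing d with
  | nil => rfl
  | cons r t ih =>
    rw [List.foldl_cons, ih, List.map_cons, List.filter_cons]
    by_cases h : pvGetFam r = "baseline"
    · simp [h]
    · simp [h]

lemma pv_sorted2_eq_sorted_lex {α κ₁ κ₂ : Type} [LinearOrder κ₁] [LinearOrder κ₂]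
    (xs : List α) (k1 : α → κ₁) (k2 : α → κ₂) :
    PySem.List.sorted2 xs k1 k2 = PySem.List.sorted xs (fun x => toLex (k1 x, k2 x)) := by
  unfold PySem.List.sorted2 PySem.List.sorted
  simp only [if_neg (by decide : ¬ (false = true))]
  congr 1
  funext acc x
  congr 1
  funext a b
  rw [Bool.eq_iff_iff]
  simp only [Bool.or_eq_true, Bool.and_eq_true, Bool.not_eq_true', decide_eq_true_eq,
    decide_eq_false_iff_not, Prod.Lex.lt_iff, ofLex_toLex]
  constructor
  · rintro (h | ⟨h1, h2⟩)
    · exact Or.inl h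
    · by_cases h0 : k1 a < k1 b
      · exact Or.inl h0
      · exact Or.inr ⟨le_antisymm (not_lt.mp h1) (not_lt.mp h0), h2⟩
  · rintro (h | ⟨h1, h2⟩)
    · exact Or.inl h
    · exact Or.inr ⟨by rw [h1]; exact lt_irrefl _, h2⟩

lemma pv_families_eq (fams : List String) (mp : Int) :
    ((PySem.Dict.counter fams).items.filter (fun p => p.2 ≥ mp)).map (fun p => p.1)
    = (PySem.Set.ofList fams).filter (pvQ fams mp) := by
  rw [PySem.Dict.items_counter, List.filter_map, List.map_map]
  simp only [Function.comp_def, List.map_id']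
  rfl

-- every family in the predefined list has sort key (index, itself) with index < 14
lemma pv_key1_lt_of_mem {f : String} (h : f ∈ FAMILY_ORDER_L) :
    (pv_family_sort_key f).1 < 14 := by
  fin_cases h <;> decide

lemma pv_key_of_not_mem {f : String} (h : f ∉ FAMILY_ORDER_L) :
    pv_family_sort_key f = (14, f) := by
  simp only [pv_family_sort_key, if_neg h]; rfl

lemma pv_FO_pairwise : FAMILY_ORDER_L.Pairwise (fun a b => pvKey a < pvKey b) := by
  decide

-- the core fact: A's key-function sort of the qualifying families IS B's ordered walk
-- of FAMILY_ORDER followed by the alphabetical tail of unknown families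
lemma pv_main (fams : List String) (mp : Int) :
    PySem.List.sorted ((PySem.Set.ofList fams).filter (pvQ fams mp)) pvKey
    = FAMILY_ORDER_L.filter (fun f => fams.contains f && pvQ fams mp f)
      ++ PySem.List.sorted
          ((PySem.Set.ofList fams).filter (fun f => !decide (f ∈ FAMILY_ORDER_L) && pvQ fams mp f))
          (fun x => x) := by
  set q : String → Bool := pvQ fams mp with hq
  set S : List String := PySem.Set.ofList fams with hS
  have hSnd : S.Nodup := PySem.Set.nodup_ofList fams
  have hmemS : ∀ f, f ∈ S ↔ f ∈ fams := fun f => PySem.Set.mem_ofList fams f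
  set known : List String := FAMILY_ORDER_L.filter (fun f => fams.contains f && q f) with hknown
  set extras : List String :=
    PySem.List.sorted (S.filter (fun f => !decide (f ∈ FAMILY_ORDER_L) && q f)) (fun x => x)
      with hextras
  set families : List String := S.filter q with hfml
  have hmk : ∀ f, f ∈ known ↔ f ∈ FAMILY_ORDER_L ∧ f ∈ fams ∧ q f = true := by
    intro f
    simp [hknown, List.mem_filter]
  have hme : ∀ f, f ∈ extras ↔ f ∉ FAMILY_ORDER_L ∧ f ∈ fams ∧ q f = true := by
    intro f
    rw [hextras, PySem.List.mem_sorted, List.mem_filter]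
    simp [hmemS f]
    tauto
  have hmf : ∀ f, f ∈ families ↔ f ∈ fams ∧ q f = true := by
    intro f
    rw [hfml, List.mem_filter, hmemS f]
  have hFOnd : FAMILY_ORDER_L.Nodup := by decide
  have hknd : known.Nodup := hFOnd.filter _
  have hend : extras.Nodup := ((PySem.List.sorted_perm _ _ _).nodup_iff).mpr (hSnd.filter _)
  have hfnd : families.Nodup := hSnd.filter _
  have hdisj : known.Disjoint extras := by
    intro f hk he
    exact ((hme f).mp he).1 ((hmk f).mp hk).1
  have hperm : (known ++ extras).Perm families := by
    rw [List.perm_ext_iff_of_nodup (List.Nodup.append hknd hend hdisj) hfnd]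
    intro f
    rw [List.mem_append, hmk f, hme f, hmf f]
    by_cases h : f ∈ FAMILY_ORDER_L <;> simp [h]
  have hpk : known.Pairwise (fun a b => pvKey a < pvKey b) := pv_FO_pairwise.filter _
  have hpe : extras.Pairwise (fun a b => pvKey a < pvKey b) := by
    have hle : extras.Pairwise (fun a b : String => a ≤ b) :=
      PySem.List.sorted_pairwise _ (fun x => x)
    have hne : extras.Pairwise (fun a b : String => a ≠ b) := hend
    have hlt : extras.Pairwise (fun a b : String => a < b) :=
      hle.imp₂ (fun a b h1 h2 => lt_of_le_of_ne h1 h2) hne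
    refine hlt.imp_of_mem ?_
    intro a b ha hb hab
    have ha' := ((hme a).mp ha).1
    have hb' := ((hme b).mp hb).1
    rw [pvKey, pvKey, pv_key_of_not_mem ha', pv_key_of_not_mem hb']
    rw [Prod.Lex.lt_iff]
    exact Or.inr ⟨rfl, hab⟩
  have hcross : ∀ a ∈ known, ∀ b ∈ extras, pvKey a < pvKey b := by
    intro a ha b hb
    have ha' := ((hmk a).mp ha).1
    have hb' := ((hme b).mp hb).1
    rw [pvKey, pvKey, pv_key_of_not_mem hb', Prod.Lex.lt_iff]
    exact Or.inl (pv_key1_lt_of_mem ha')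
  exact PySem.List.sorted_eq_of_perm_of_pairwise_lt families (known ++ extras) pvKey hperm
    (List.pairwise_append.mpr ⟨hpk, hpe, hcross⟩)

-- ===== VERDICT (by name: the statement is the Claim_ definition above) =====
theorem family_order_spec : Claim_equal_family_order := by
  intro rows min_points _ _
  unfold Spec_family_order family_order family_order_alt
  rw [pv_foldl_counter, PySem.Dict.foldl_insert_getD_add_one_eq_counter,
    pv_sorted2_eq_sorted_lex, pv_families_eq]
  simp only [PySem.Dict.contains_counter, PySem.Dict.getD_counter, PySem.Dict.keys_counter]
  exact pv_main ((rows.map pvGetFam).filter (fun f => f ≠ "baseline")) min_points
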